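-- pv_equiv track=rewrite | github.com/yushyn-andriy/algo | competitions/onlinejudge/ch2/algorithm/00400/p00400.py | unix_ls
-- ===== SOURCE A (Python) =====
-- WIDTH = 60
--
-- def unix_ls(filenames, width=WIDTH):
--     n = len(filenames)
--     longest = len(max(filenames, key=lambda x: len(x)))
--     filenames = sorted(filenames)
--
--     n_col = (width - longest) // (longest + 2)  + 1
--     n_rows = 0
--
--     while n_rows * n_col < n:
--         n_rows += 1
--
--     matrix = [[''] * n_col for _ in range(n_rows)]
--     c_idx = 0
--     for j in range(n_col):
--         for i in range(n_rows):
--             col_width = longest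
--             if j < n_col -1:
--                 col_width += 2
--             matrix[i][j] = f'{filenames[c_idx]:<{col_width}}'
--             c_idx += 1
--             if c_idx >= len(filenames):
--                 return matrix
-- ===== SOURCE B (Python) =====
-- WIDTH = 60
--
-- def unix_ls(filenames, width=WIDTH):
--     n = len(filenames)
--     longest = len(max(filenames, key=lambda x: len(x)))
--     filenames = sorted(filenames)
--
--     n_col = (width - longest) // (longest + 2) + 1
--     n_rows = 0
--     while n_rows * n_col < n:
--         n_rows += 1
--
--     # slice the sorted names into column chunks, then transpose into rows
--     cols = [filenames[j * n_rows:(j + 1) * n_rows] for j in range(n_col)]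
--     matrix = []
--     for i in range(n_rows):
--         row = []
--         for j, col in enumerate(cols):
--             if i < len(col):
--                 pad = longest + 2 if j < n_col - 1 else longest
--                 row.append(f'{col[i]:<{pad}}')
--             else:
--                 row.append('')
--         matrix.append(row)
--     return matrix
-- ===== Notes on version B (the rewrite author's own statement) =====
-- stated objective: alternative
-- what changed: Instead of mutating a pre-allocated matrix cell-by-cell with a running counter and an early return, B slices the sorted filenames into column chunks and builds each output row by transposing those chunks, leaving '' for missing trailing cells.
-- outside the precondition, e.g. on unix_ls([], 60): A raises ValueError, B raises ValueError
import Mathlib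
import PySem

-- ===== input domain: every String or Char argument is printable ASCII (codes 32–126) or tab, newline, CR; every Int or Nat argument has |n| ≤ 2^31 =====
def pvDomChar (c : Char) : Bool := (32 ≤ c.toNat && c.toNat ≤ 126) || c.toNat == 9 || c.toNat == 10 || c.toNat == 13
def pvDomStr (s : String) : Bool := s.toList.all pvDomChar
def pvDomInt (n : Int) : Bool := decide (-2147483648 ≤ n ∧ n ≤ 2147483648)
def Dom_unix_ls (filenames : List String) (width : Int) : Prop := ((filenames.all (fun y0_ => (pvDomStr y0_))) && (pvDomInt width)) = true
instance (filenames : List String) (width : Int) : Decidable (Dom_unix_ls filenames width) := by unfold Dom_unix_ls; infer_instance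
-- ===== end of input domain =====

-- B builds the rows by transposing sorted-filename column slices instead of mutating a
-- pre-allocated matrix cell-by-cell with a running counter (alternative decomposition, same cost).


-- ===== PORT A =====

-- helpers for the Python lines the two sources share verbatim (padding, n_col/n_rows prologue)
/-- `f'{s:<{w}}'`, exact for `0 ≤ w` (left-justify with spaces, never truncates). -/
def pvLjust (s : String) (w : Int) : String :=
  String.ofList (s.toList ++ List.replicate (w - (s.toList.length : Int)).toNat ' ')

/-- the `while n_rows * n_col < n: n_rows += 1` loop; `fuel` only bounds the iterations
    (inside `Pre_unix_ls` the loop stops after at most `len(filenames)` steps; outside, Python diverges). -/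
def pvNRows (fuel : Nat) (n_col n acc : Int) : Int :=
  match fuel with
  | 0 => acc
  | f + 1 => if acc * n_col < n then pvNRows f n_col n (acc + 1) else acc

/-- inner `for i in range(n_rows)` of A: fill column `j`, early `return matrix` as `.inr`. -/
def pvFillCol (fns : List String) (longest n_col : Int) (j : Nat) :
    List Nat → List (List String) → Int → (List (List String) × Int) ⊕ (List (List String))
  | [], M, c => .inl (M, c)
  | i :: rest, M, c =>
    let col_width := if (j : Int) < n_col - 1 then longest + 2 else longest
    match PySem.List.pyGet? fns c with
    | none => .inr M        -- IndexError; never reached inside Pre_unix_ls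
    | some s =>
      let M' := M.modify i (fun row => row.set j (pvLjust s col_width))
      if c + 1 ≥ (fns.length : Int) then .inr M'
      else pvFillCol fns longest n_col j rest M' (c + 1)

/-- outer `for j in range(n_col)` of A. -/
def pvFillCols (fns : List String) (longest n_col : Int) (n_rows : Nat) :
    List Nat → List (List String) → Int → List (List String)
  | [], M, _ => M          -- Python falls through returning None; never reached inside Pre_unix_ls
  | j :: rest, M, c =>
    match pvFillCol fns longest n_col j (List.range n_rows) M c with
    | .inr done => done
    | .inl (M', c') => pvFillCols fns longest n_col n_rows rest M' c'

def unix_ls (filenames : List String) (width : Int) : List (List String) :=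
  match PySem.List.max? filenames (fun x => PySem.Str.len x) with
  | none => []             -- max([]) raises ValueError (excluded by Pre_unix_ls)
  | some m =>
    let n : Int := filenames.length
    let longest := PySem.Str.len m
    let fns := PySem.List.sorted filenames (fun x => x) false
    let n_col := PySem.Int.floordiv (width - longest) (longest + 2) + 1
    let n_rows := pvNRows filenames.length n_col n 0
    let M0 := List.replicate n_rows.toNat (List.replicate n_col.toNat "")
    pvFillCols fns longest n_col n_rows.toNat (List.range n_col.toNat) M0 0

-- ===== PORT B =====

def unix_ls_alt (filenames : List String) (width : Int) : List (List String) :=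
  match PySem.List.max? filenames (fun x => PySem.Str.len x) with
  | none => []             -- max([]) raises ValueError (excluded by Pre_unix_ls)
  | some m =>
    let n : Int := filenames.length
    let longest := PySem.Str.len m
    let fns := PySem.List.sorted filenames (fun x => x) false
    let n_col := PySem.Int.floordiv (width - longest) (longest + 2) + 1
    let n_rows := pvNRows filenames.length n_col n 0
    let cols := (PySem.List.pyRange 0 n_col 1).map
      (fun j => PySem.List.slice fns (some (j * n_rows)) (some ((j + 1) * n_rows)))
    (PySem.List.pyRange 0 n_rows 1).map (fun i =>
      (PySem.List.enumerate cols 0).map (fun jc =>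
        if i < (jc.2.length : Int) then
          pvLjust (PySem.List.pyGetD jc.2 i "")
            (if jc.1 < n_col - 1 then longest + 2 else longest)
        else ""))

-- ===== PRECONDITION & SPEC =====

-- Pre_ excludes exactly the inputs where Python A does not return: the empty list
-- (max([]) raises ValueError) and inputs with a filename longer than width
-- (then n_col ≤ 0 and the `while` loop never terminates).
def Pre_unix_ls (filenames : List String) (width : Int) : Prop :=
  filenames ≠ [] ∧ ∀ s ∈ filenames, PySem.Str.len s ≤ width

instance (filenames : List String) (width : Int) : Decidable (Pre_unix_ls filenames width) := by
  unfold Pre_unix_ls; infer_instance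

def pvWitness_unix_ls : List String × Int := (["a", "bb"], 60)

def Spec_unix_ls (filenames : List String) (width : Int) (out : List (List String)) : Prop :=
  out = unix_ls_alt filenames width
instance (filenames : List String) (width : Int) (out : List (List String)) : Decidable (Spec_unix_ls filenames width out) := by unfold Spec_unix_ls; infer_instance

-- ===== CLAIM (what is proved, stated in full; the proofs are below) =====
def Claim_equal_unix_ls : Prop := ∀ (filenames : List String) (width : Int), Dom_unix_ls filenames width → Pre_unix_ls filenames width → Spec_unix_ls filenames width (unix_ls filenames width)

-- ===== LEMMAS AND PROOFS =====

def pvCell (fns : List String) (longest n_col : Int) (rN q i : Nat) : String :=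
  pvLjust (fns.getD (q * rN + i) "") (if (q : Int) < n_col - 1 then longest + 2 else longest)

def pvMat (fns : List String) (longest n_col : Int) (rN cN bound : Nat) : List (List String) :=
  (List.range rN).map (fun i => (List.range cN).map (fun q =>
    if q * rN + i < bound ∧ q * rN + i < fns.length then pvCell fns longest n_col rN q i else ""))

lemma pv_pos_inj {q i j i₀ r : Nat} (hi : i < r) (hi₀ : i₀ < r)
    (h : q * r + i = j * r + i₀) : q = j ∧ i = i₀ := by
  have hq : q = j := by
    rcases Nat.lt_trichotomy q j with hlt | he | hgt
    · exfalso; nlinarith [Nat.mul_le_mul_right r (show q + 1 ≤ j from hlt)]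
    · exact he
    · exfalso; nlinarith [Nat.mul_le_mul_right r (show j + 1 ≤ q from hgt)]
  subst hq
  exact ⟨rfl, by omega⟩

lemma pvNRows_spec : ∀ (fuel : Nat) (c n acc : Int), 1 ≤ c → n ≤ (acc + fuel) * c →
    acc ≤ pvNRows fuel c n acc ∧ n ≤ pvNRows fuel c n acc * c := by
  intro fuel
  induction fuel with
  | zero => intro c n acc hc hf; simp [pvNRows]; simpa using hf
  | succ f ih =>
    intro c n acc hc hf
    rw [pvNRows]
    split
    · have hf' : n ≤ (acc + 1 + (f : Int)) * c := by push_cast at hf ⊢; nlinarith [hf]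
      have := ih c n (acc + 1) hc hf'
      exact ⟨by omega, this.2⟩
    · exact ⟨le_refl _, by omega⟩

lemma pvMat_step (fns : List String) (longest n_col : Int) (rN cN j i₀ : Nat)
    (hi : i₀ < rN) (hp : j * rN + i₀ < fns.length) :
    (pvMat fns longest n_col rN cN (j * rN + i₀)).modify i₀
      (fun row => row.set j (pvCell fns longest n_col rN j i₀)) =
    pvMat fns longest n_col rN cN (j * rN + i₀ + 1) := by
  apply List.ext_getElem
  · simp [pvMat]
  · intro i h1 h2
    have hiR : i < rN := by simpa [pvMat] using h2
    rw [List.getElem_modify]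
    by_cases hii : i₀ = i
    · subst hii
      simp only [pvMat, List.getElem_map, List.getElem_range]
      rw [if_pos trivial]
      apply List.ext_getElem
      · simp
      · intro q hq1 hq2
        have hqC : q < cN := by simpa using hq2
        rw [List.getElem_set]
        simp only [List.getElem_map, List.getElem_range]
        by_cases hqj : j = q
        · subst hqj
          simp [hp]
        · have hne : ¬ (q * rN + i₀ = j * rN + i₀) := by
            intro he; exact hqj ((pv_pos_inj hi hi he).1.symm)
          simp only [if_neg hqj]
          by_cases hlt : q * rN + i₀ < j * rN + i₀ ∧ q * rN + i₀ < fns.length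
          · rw [if_pos hlt, if_pos ⟨by omega, hlt.2⟩]
          · rw [if_neg hlt, if_neg (by intro hc; exact hlt ⟨by omega, hc.2⟩)]
    · simp only [pvMat, List.getElem_map, List.getElem_range]
      rw [if_neg hii]
      apply List.map_congr_left
      intro q hq
      have hne : ¬ (q * rN + i = j * rN + i₀) := by
        intro he; exact hii ((pv_pos_inj hiR hi he).2.symm)
      by_cases hlt : q * rN + i < j * rN + i₀ ∧ q * rN + i < fns.length
      · rw [if_pos hlt, if_pos ⟨by omega, hlt.2⟩]
      · rw [if_neg hlt, if_neg (by intro hc; exact hlt ⟨by omega, hc.2⟩)]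

lemma pvFillCol_spec (fns : List String) (longest n_col : Int) (rN cN nN : Nat)
    (hn : nN = fns.length) (j : Nat) :
    ∀ (k i₀ : Nat), i₀ + k = rN → j * rN + i₀ < nN →
    pvFillCol fns longest n_col j (List.range' i₀ k)
        (pvMat fns longest n_col rN cN (j * rN + i₀)) ((j * rN + i₀ : Nat) : Int) =
      (if nN ≤ (j + 1) * rN then .inr (pvMat fns longest n_col rN cN nN)
      else .inl (pvMat fns longest n_col rN cN ((j + 1) * rN), (((j + 1) * rN : Nat) : Int))) := by
  intro k
  induction k with
  | zero =>
    intro i₀ hk hp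
    have hi0 : i₀ = rN := by omega
    have hmul : (j + 1) * rN = j * rN + rN := by ring
    rw [if_neg (by omega)]
    simp only [List.range'_zero, pvFillCol]
    have he : j * rN + i₀ = (j + 1) * rN := by rw [hmul]; omega
    rw [he]
  | succ kk ih =>
    intro i₀ hk hp
    have hi : i₀ < rN := by omega
    have hpL : j * rN + i₀ < fns.length := by omega
    rw [List.range'_succ]
    simp only [pvFillCol]
    have hg : PySem.List.pyGet? fns ((j * rN + i₀ : Nat) : Int)
        = some (fns[j * rN + i₀]'hpL) := by
      rw [PySem.List.pyGet?_natCast]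
      exact List.getElem?_eq_getElem hpL
    have hcell : pvCell fns longest n_col rN j i₀
        = pvLjust (fns[j * rN + i₀]'hpL) (if (j : Int) < n_col - 1 then longest + 2 else longest) := by
      simp only [pvCell]
      rw [List.getD_eq_getElem]
    simp only [hg]
    rw [← hcell, pvMat_step fns longest n_col rN cN j i₀ hi hpL]
    by_cases hend : nN ≤ j * rN + i₀ + 1
    · rw [if_pos (by rw [← hn]; push_cast; omega)]
      rw [if_pos (by nlinarith)]
      have : j * rN + i₀ + 1 = nN := by omega
      rw [this]
    · rw [if_neg (by rw [← hn]; push_cast; omega)]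
      have he : j * rN + i₀ + 1 = j * rN + (i₀ + 1) := by omega
      have hc : ((j * rN + i₀ : Nat) : Int) + 1 = ((j * rN + (i₀ + 1) : Nat) : Int) := by push_cast; ring
      rw [he, hc]
      exact ih (i₀ + 1) (by omega) (by omega)

lemma pvFillCols_spec (fns : List String) (longest n_col : Int) (rN cN nN : Nat)
    (hn : nN = fns.length) (hcol : nN ≤ rN * cN) :
    ∀ (k j₀ : Nat), j₀ + k = cN → j₀ * rN < nN →
    pvFillCols fns longest n_col rN (List.range' j₀ k)
        (pvMat fns longest n_col rN cN (j₀ * rN)) ((j₀ * rN : Nat) : Int) =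
      pvMat fns longest n_col rN cN nN := by
  intro k
  induction k with
  | zero =>
    intro j₀ hk hp
    exfalso
    have h1 : cN ≤ j₀ := by omega
    have h2 : cN * rN ≤ j₀ * rN := Nat.mul_le_mul_right rN h1
    nlinarith
  | succ kk ih =>
    intro j₀ hk hp
    rw [List.range'_succ]
    simp only [pvFillCols]
    have h0 : j₀ * rN + 0 = j₀ * rN := by omega
    have := pvFillCol_spec fns longest n_col rN cN nN hn j₀ rN 0 (by omega) (by omega)
    rw [h0] at this
    rw [List.range_eq_range', this]
    by_cases hend : nN ≤ (j₀ + 1) * rN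
    · rw [if_pos hend]
    · rw [if_neg hend]
      exact ih (j₀ + 1) (by omega) (by omega)

lemma pvAlt_eq (fns : List String) (longest : Int) (rN cN nN : Nat) (hn : nN = fns.length) :
    ((PySem.List.pyRange 0 ((rN : Nat) : Int) 1).map (fun i =>
      (PySem.List.enumerate ((PySem.List.pyRange 0 ((cN : Nat) : Int) 1).map
          (fun j => PySem.List.slice fns (some (j * ((rN : Nat) : Int)))
            (some ((j + 1) * ((rN : Nat) : Int))))) 0).map (fun jc =>
        if i < (jc.2.length : Int) then
          pvLjust (PySem.List.pyGetD jc.2 i "")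
            (if jc.1 < ((cN : Nat) : Int) - 1 then longest + 2 else longest)
        else "")))
    = pvMat fns longest ((cN : Nat) : Int) rN cN nN := by
  rw [PySem.List.pyRange_zero_natCast, PySem.List.pyRange_zero_natCast,
    List.map_map, List.map_map]
  apply List.ext_getElem
  · simp [pvMat]
  · intro i h1 h2
    have hiR : i < rN := by simpa using h1
    simp only [List.getElem_map, List.getElem_range, pvMat]
    apply List.ext_getElem
    · simp [PySem.List.length_enumerate]
    · intro q hq1 hq2
      have hqC : q < cN := by simpa [PySem.List.length_enumerate] using hq1
      simp only [List.getElem_map, PySem.List.getElem_enumerate, List.getElem_range,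
        Function.comp_apply]
      have h1c : ((q : Int) * ((rN : Nat) : Int)) = ((q * rN : Nat) : Int) := by push_cast; ring
      have h2c : (((q : Int) + 1) * ((rN : Nat) : Int)) = ((q * rN : Nat) : Int) + ((rN : Nat) : Int) := by
        push_cast; ring
      rw [h1c, h2c, PySem.List.slice_natCast_add]
      have hlen : ((fns.drop (q * rN)).take rN).length = min rN (fns.length - q * rN) := by
        simp
      have hcond : ((i : Nat) : Int) < (((fns.drop (q * rN)).take rN).length : Int)
          ↔ (q * rN + i < nN ∧ q * rN + i < fns.length) := by
        rw [hlen]; push_cast; omega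
      by_cases hfill : q * rN + i < nN ∧ q * rN + i < fns.length
      · rw [if_pos (hcond.mpr hfill), if_pos hfill]
        have hv : PySem.List.pyGetD ((fns.drop (q * rN)).take rN) ((i : Nat) : Int) ""
            = fns.getD (q * rN + i) "" := by
          rw [PySem.List.pyGetD_natCast]
          have hlt : i < ((fns.drop (q * rN)).take rN).length := by rw [hlen]; omega
          rw [List.getD_eq_getElem _ _ hlt, List.getElem_take, List.getElem_drop,
            List.getD_eq_getElem]
        rw [hv]
        simp [pvCell]
      · rw [if_neg (fun h => hfill (hcond.mp h)), if_neg hfill]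


lemma pvM0 (fns : List String) (longest n_col : Int) (rN cN : Nat) :
    List.replicate rN (List.replicate cN "") = pvMat fns longest n_col rN cN 0 := by
  apply List.ext_getElem
  · simp [pvMat]
  · intro i h1 h2
    simp [pvMat, List.getElem_replicate]

-- ===== VERDICT (by name: the statement is the Claim_ definition above) =====
theorem unix_ls_spec : Claim_equal_unix_ls := by
  intro filenames width _hdom hpre
  unfold Spec_unix_ls
  obtain ⟨hne, hwid⟩ := hpre
  cases hmax : PySem.List.max? filenames (fun x => PySem.Str.len x) with
  | none => simp only [unix_ls, unix_ls_alt, hmax]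
  | some m =>
    simp only [unix_ls, unix_ls_alt, hmax]
    have hm : m ∈ filenames := PySem.List.max?_mem (κ := Int) hmax
    have hL0 : 0 ≤ PySem.Str.len m := by simp [PySem.Str.len_eq]
    have hLw : PySem.Str.len m ≤ width := hwid m hm
    set L := PySem.Str.len m with hLdef
    set C := PySem.Int.floordiv (width - L) (L + 2) + 1 with hCdef
    set fns := PySem.List.sorted filenames (fun x => x) false with hfnsdef
    set R := pvNRows filenames.length C (filenames.length : Int) 0 with hRdef
    have hc1 : 1 ≤ C := by
      rw [hCdef, PySem.Int.floordiv_eq_ediv_of_pos (by omega)]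
      have := Int.ediv_nonneg (show (0:Int) ≤ width - L by omega) (show (0:Int) ≤ L + 2 by omega)
      omega
    have hnN1 : 0 < filenames.length := List.length_pos_iff.mpr hne
    have hnn : (0:Int) ≤ (filenames.length : Int) := Int.natCast_nonneg _
    have hRs := pvNRows_spec filenames.length C (filenames.length : Int) 0 hc1
      (by nlinarith [hc1, hnn])
    rw [← hRdef] at hRs
    obtain ⟨hR0, hRge⟩ := hRs
    obtain ⟨cN, hcN⟩ : ∃ k : Nat, C = (k : Int) := ⟨C.toNat, (Int.toNat_of_nonneg (by omega)).symm⟩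
    obtain ⟨rN, hrN⟩ : ∃ k : Nat, R = (k : Int) := ⟨R.toNat, (Int.toNat_of_nonneg hR0).symm⟩
    have hlen : fns.length = filenames.length := by
      rw [hfnsdef]; simp [PySem.List.length_sorted]
    have hcol : filenames.length ≤ rN * cN := by
      have h : ((filenames.length : Int)) ≤ (rN : Int) * (cN : Int) := by
        rw [← hrN, ← hcN]; exact hRge
      exact_mod_cast h
    rw [hcN, hrN]
    simp only [Int.toNat_natCast]
    rw [pvM0 fns L ((cN : Nat) : Int) rN cN, List.range_eq_range']
    have hA := pvFillCols_spec fns L ((cN : Nat) : Int) rN cN filenames.length hlen.symm hcol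
      cN 0 (by omega) (by simpa using hnN1)
    simp only [Nat.zero_mul, Nat.cast_zero] at hA
    rw [hA]
    exact (pvAlt_eq fns L rN cN filenames.length hlen.symm).symm
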